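-- pv_equiv track=rewrite | github.com/Hsu7183/xs-core-engine | backup/01/bundle/src/optimize/gui_backend.py | estimate_sequential_total
-- ===== SOURCE A (Python) =====
-- from typing import Any, Iterable
--
-- def estimate_sequential_total(variable_specs: list[dict[str, Any]], seed_keep_count: int) -> int:
--     if not variable_specs:
--         return 0
--     total = 0
--     active_seeds = 1
--     for spec in variable_specs:
--         total += active_seeds * len(spec["values"])
--         active_seeds = max(1, seed_keep_count)
--     return total
-- ===== SOURCE B (Python) =====
-- def estimate_sequential_total(variable_specs, seed_keep_count):
--     if not variable_specs:
--         return 0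
--     k = max(1, seed_keep_count)
--     total_values = sum(len(s["values"]) for s in variable_specs)
--     # uniform-coefficient total, then subtract the over-count on the first spec
--     return k * total_values - (k - 1) * len(variable_specs[0]["values"])
-- ===== Notes on version B (the rewrite author's own statement) =====
-- stated objective: simpler
-- what changed: Drops A's running active_seeds state: B sums all value-list lengths uniformly in one pass and corrects the over-count on the first spec arithmetically (k*S - (k-1)*len(first)).
import Mathlib
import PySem

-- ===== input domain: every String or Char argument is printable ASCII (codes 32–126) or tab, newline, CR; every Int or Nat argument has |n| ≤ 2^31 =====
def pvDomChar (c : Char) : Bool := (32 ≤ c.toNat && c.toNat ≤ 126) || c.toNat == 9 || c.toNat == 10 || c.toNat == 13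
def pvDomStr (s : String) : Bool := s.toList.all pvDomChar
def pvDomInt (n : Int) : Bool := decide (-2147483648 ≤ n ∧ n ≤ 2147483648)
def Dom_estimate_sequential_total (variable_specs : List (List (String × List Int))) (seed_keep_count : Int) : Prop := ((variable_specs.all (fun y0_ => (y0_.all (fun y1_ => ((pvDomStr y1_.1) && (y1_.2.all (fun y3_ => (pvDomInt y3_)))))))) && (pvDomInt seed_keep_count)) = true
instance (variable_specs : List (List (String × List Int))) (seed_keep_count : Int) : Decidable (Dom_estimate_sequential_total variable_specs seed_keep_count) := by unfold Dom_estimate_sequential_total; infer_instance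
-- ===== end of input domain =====

-- B drops A's running active_seeds state: one uniform pass sums all value-list lengths, then an arithmetic correction (k*S - (k-1)*len(first)) fixes the first spec's coefficient to 1; equivalence on specs that all carry a "values" key.

-- ===== PORT A =====
-- len(spec["values"]) as an Int; outside Pre_ (missing key, Python KeyError) the default [] is used but nothing is claimed there
def pvValuesLen (spec : List (String × List Int)) : Int :=
  (((PySem.Dict.mk spec).getD "values" []).length : Int)

def estimate_sequential_total (variable_specs : List (List (String × List Int))) (seed_keep_count : Int) : Int :=
  if variable_specs = [] then 0
  else
    (variable_specs.foldl
      (fun (st : Int × Int) spec => (st.1 + st.2 * pvValuesLen spec, max 1 seed_keep_count))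
      (0, 1)).1

-- ===== PORT B =====
def estimate_sequential_total_alt (variable_specs : List (List (String × List Int))) (seed_keep_count : Int) : Int :=
  match variable_specs with
  | [] => 0
  | first :: _ =>
    let k := max 1 seed_keep_count
    k * (variable_specs.map pvValuesLen).sum - (k - 1) * pvValuesLen first

-- ===== PRECONDITION & SPEC =====
-- Pre_ excludes specs missing the "values" key, on which the Python A raises KeyError (returns no value).
def Pre_estimate_sequential_total (variable_specs : List (List (String × List Int))) (seed_keep_count : Int) : Prop :=
  ∀ spec ∈ variable_specs, ((PySem.Dict.mk spec).get? "values").isSome = true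
instance (variable_specs : List (List (String × List Int))) (seed_keep_count : Int) : Decidable (Pre_estimate_sequential_total variable_specs seed_keep_count) := by unfold Pre_estimate_sequential_total; infer_instance

def pvWitness_estimate_sequential_total : (List (List (String × List Int))) × Int :=
  ([[("values", [1, 2])], [("values", [3])]], 2)

def Spec_estimate_sequential_total (variable_specs : List (List (String × List Int))) (seed_keep_count : Int) (out : Int) : Prop := out = estimate_sequential_total_alt variable_specs seed_keep_count
instance (variable_specs : List (List (String × List Int))) (seed_keep_count : Int) (out : Int) : Decidable (Spec_estimate_sequential_total variable_specs seed_keep_count out) := by unfold Spec_estimate_sequential_total; infer_instance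

-- ===== CLAIM =====
def Claim_equal_estimate_sequential_total : Prop := ∀ (variable_specs : List (List (String × List Int))) (seed_keep_count : Int), Dom_estimate_sequential_total variable_specs seed_keep_count → Pre_estimate_sequential_total variable_specs seed_keep_count → Spec_estimate_sequential_total variable_specs seed_keep_count (estimate_sequential_total variable_specs seed_keep_count)

-- ===== LEMMAS AND PROOFS =====
theorem pv_fold_eq (rest : List (List (String × List Int))) (k : Int) :
    ∀ t : Int,
      (rest.foldl (fun (st : Int × Int) spec => (st.1 + st.2 * pvValuesLen spec, max 1 k)) (t, max 1 k)).1
        = t + (max 1 k) * (rest.map pvValuesLen).sum := by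
  induction rest with
  | nil => intro t; simp
  | cons s r ih =>
    intro t
    simp only [List.foldl_cons, List.map_cons, List.sum_cons]
    rw [ih]
    ring

-- ===== VERDICT =====
theorem estimate_sequential_total_spec : Claim_equal_estimate_sequential_total := by
  intro specs k _ _
  unfold Spec_estimate_sequential_total estimate_sequential_total estimate_sequential_total_alt
  cases specs with
  | nil => simp
  | cons first rest =>
    simp only [List.foldl_cons, if_neg (List.cons_ne_nil first rest), List.map_cons, List.sum_cons]
    rw [show ((0 : Int) + 1 * pvValuesLen first, max 1 k) = (pvValuesLen first, max 1 k) by ring_nf,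
        pv_fold_eq]
    ring
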